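-- pv_equiv track=rewrite | github.com/EEB113B/hw4-Code-Review | 17.py | to_1D_array
-- ===== SOURCE A (Python) =====
-- def to_1D_array(Matrix, Major): # Matrix型態:list[list]，Major型態:str
--     size = len(Matrix) #先計算出該矩陣大小
--     lst = [None] * ((1 + size) * size // 2) #lst為最後要回傳的list
--     a = 0    #a,b,c,d分別代表四種矩陣判斷標準
--     b = 0
--     c = 0
--     d = 0
--     right_up = False    #右上三角形    #一開始先設四種矩陣均為False，若判斷出是哪種矩陣，則該類型矩陣轉為True，接著跳到下一步計算
--     right_down = False  #右下三角形
--     left_up = False     #左上三角形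
--     left_down = False   #左下三角形
-- #--------------------------------------------------右上三角形矩陣判斷--------------------------------------------------
--     for y in range(size):
--         for x in range(0, y):
--             if (Matrix[y][x]==0):                #依照右上三角形矩陣特性設計判斷式
--                 a += 1                           #a計算左下角由0組成的三角形中0的數量
--     if a == ((1+(size-1))*(size-1))//2:          #若左下角由0組成的三角形中0的數量符合理論值(((1+(size-1))*(size-1))//2)
--         right_up = True                          #則代表該矩陣為右上三角形矩陣
-- #--------------------------------------------------左上三角形矩陣判斷--------------------------------------------------
--     if right_up == False :  #若非右上三角形矩陣，再判斷是否為左上三角形矩陣(節省計算時間)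
--         for y in range(size):
--             for x in range(size-y, size):
--                 if (Matrix[y][x]==0):            #依照左上三角形矩陣特性設計判斷式
--                     b += 1                       #b計算右下角由0組成的三角形中0的數量
--         if b == ((1+(size-1))*(size-1))//2:      #若右下角由0組成的三角形中0的數量符合理論值(((1+(size-1))*(size-1))//2)
--             left_up = True                       #則代表該矩陣為左上三角形矩陣
-- #--------------------------------------------------左下三角形矩陣判斷--------------------------------------------------
--     if right_up == left_up == False : #若非右上三角形、左上三角形矩陣矩陣，再判斷是否為左下三角形矩陣(節省計算時間)
--         for y in range(size-1):
--             for x in range(y+1, size):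
--                 if (Matrix[y][x]==0):            #依照左下三角形矩陣特性設計判斷式
--                     c += 1                       #c計算右上角由0組成的三角形中0的數量
--         if c == ((1+(size-1))*(size-1))//2:      #若右上角由0組成的三角形中0的數量符合理論值(((1+(size-1))*(size-1))//2)
--             left_down = True                     #則代表該矩陣為左下三角形矩陣
-- #--------------------------------------------------右下三角形矩陣判斷--------------------------------------------------
--     if right_up == left_up == left_down == False : #若非右上三角形、左上三角形、左下三角形矩陣矩陣，再判斷是否為右下三角形矩陣(節省計算時間)
--         for y in range(size-1):
--             for x in range(0, size-(y+1)):
--                 if (Matrix[y][x]==0):            #依照右下三角形矩陣特性設計判斷式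
--                     d += 1                       #d計算左上角由0組成的三角形中0的數量
--         if d == ((1+(size-1))*(size-1))//2:      #若左上角由0組成的三角形中0的數量符合理論值(((1+(size-1))*(size-1))//2)
--             right_down = True                    #則代表該矩陣為右下三角形矩陣
-- #------------------------------------------------------------------------------
--     if right_up == True:   #若矩陣為右上三角形矩陣，則進行這一區塊程式
--         if Major == 'r':   #輸入選擇Row-Major
--             index = 0      #變數index為最後要回傳的list之index
--             for y in range(size):                 #依照Row-Major之特性把二維矩陣壓縮成一維矩陣
--                 for x in range(y, size):
--                     lst[index] = Matrix[y][x]     #利用for迴圈一個一個紀載數值進lst中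
--                     index += 1
--         elif Major == 'c': #輸入選擇Column-Major
--             index = 0      #變數index為最後要回傳的list之index
--             for x in range(size):                 #依照Column-Major之特性把二維矩陣壓縮成一維矩陣
--                 for y in range(0, x+1):
--                     lst[index] = Matrix[y][x]     #利用for迴圈一個一個紀載數值進lst中
--                     index += 1
-- #-------------------------------------------------------------------------------
--     if left_up == True:   #若矩陣為左上三角形矩陣，則進行這一區塊程式
--         if Major == 'r':  #輸入選擇Row-Major
--             index = 0
--             for y in range(size):                  #內容參考右上三角形矩陣壓縮過程，依照類似邏輯更改x,y範圍已達成壓縮左上三角形矩陣目標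
--                 for x in range(0, size-y):
--                     lst[index] = Matrix[y][x]
--                     index += 1
--         elif Major == 'c': #輸入選擇Column-Major
--             index = 0
--             for x in range(size):
--                 for y in range(0, size-x):
--                     lst[index] = Matrix[y][x]
--                     index += 1
-- #-------------------------------------------------------------------------------
--     if left_down == True:  #若矩陣為左下三角形矩陣，則進行這一區塊程式
--         if Major == 'r': #輸入選擇Row-Major
--             index = 0
--             for y in range(size):
--                 for x in range(0, y+1):
--                     lst[index] = Matrix[y][x]     #內容參考右上三角形矩陣壓縮過程，依照類似邏輯更改x,y範圍已達成壓縮左下三角形矩陣目標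
--                     index += 1
--         elif Major == 'c': #輸入選擇Column-Major
--             index = 0
--             for x in range(size):
--                 for y in range(x, size):
--                     lst[index] = Matrix[y][x]
--                     index += 1
-- #-------------------------------------------------------------------------------
--     if right_down == True:  #若矩陣為右下三角形矩陣，則進行這一區塊程式
--         if Major == 'r': #輸入選擇Row-Major
--             index = 0
--             for y in range(size):
--                 for x in range(size-1-y, size):
--                     lst[index] = Matrix[y][x]     #內容參考右上三角形矩陣壓縮過程，依照類似邏輯更改x,y範圍已達成壓縮右下三角形矩陣目標
--                     index += 1
--         elif Major == 'c': #輸入選擇Column-Major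
--             index = 0
--             for x in range(size):
--                 for y in range(size-1-x, size):
--                     lst[index] = Matrix[y][x]
--                     index += 1
--     return lst # 回傳值型態:list
-- ===== SOURCE B (Python) =====
-- def to_1D_array(Matrix, Major):
--     size = len(Matrix)
--     # one pass over every cell, maintaining four zero-counters, one per complementary triangle
--     a = b = c = d = 0
--     for y, row in enumerate(Matrix):
--         for x, v in enumerate(row[:size]):
--             if v == 0:
--                 if x < y:
--                     a += 1
--                 if x >= size - y:
--                     b += 1
--                 if x > y:
--                     c += 1
--                 if x < size - 1 - y:
--                     d += 1
--     T = (1 + (size - 1)) * (size - 1) // 2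
--     if a == T:
--         rows, cols = (lambda y: range(y, size)), (lambda x: range(0, x + 1))
--     elif b == T:
--         rows, cols = (lambda y: range(0, size - y)), (lambda x: range(0, size - x))
--     elif c == T:
--         rows, cols = (lambda y: range(0, y + 1)), (lambda x: range(x, size))
--     elif d == T:
--         rows, cols = (lambda y: range(size - 1 - y, size)), (lambda x: range(size - 1 - x, size))
--     else:
--         return [None] * ((1 + size) * size // 2)
--     if Major == 'r':
--         return [Matrix[y][x] for y in range(size) for x in rows(y)]
--     if Major == 'c':
--         return [Matrix[y][x] for x in range(size) for y in cols(x)]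
--     return [None] * ((1 + size) * size // 2)
-- ===== Notes on version B (the rewrite author's own statement) =====
-- stated objective: alternative
-- what changed: B replaces A's up-to-four separate zero-counting region scans (each a fresh nested loop over one triangle) and its index-mutating preallocated fill with ONE pass over all cells that maintains four zero-counters simultaneously, then classifies by the same priority chain and builds the result directly as a comprehension; Pre_ excludes ragged matrices (A can raise IndexError) and inputs whose A-result contains None (no triangle matches, or Major not 'r'/'c'), since None is not an Int.
-- outside the precondition, e.g. on to_1D_array([[1, 2], [3, 4]], 'r'): A returns [None, None, None], B returns [None, None, None]; on to_1D_array([[1, 2], [0, 3]], 'x'): A returns [None, None, None], B returns [None, None, None]; on to_1D_array([[1], [0, 2]], 'r'): A raises IndexError, B raises IndexError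
import Mathlib
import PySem

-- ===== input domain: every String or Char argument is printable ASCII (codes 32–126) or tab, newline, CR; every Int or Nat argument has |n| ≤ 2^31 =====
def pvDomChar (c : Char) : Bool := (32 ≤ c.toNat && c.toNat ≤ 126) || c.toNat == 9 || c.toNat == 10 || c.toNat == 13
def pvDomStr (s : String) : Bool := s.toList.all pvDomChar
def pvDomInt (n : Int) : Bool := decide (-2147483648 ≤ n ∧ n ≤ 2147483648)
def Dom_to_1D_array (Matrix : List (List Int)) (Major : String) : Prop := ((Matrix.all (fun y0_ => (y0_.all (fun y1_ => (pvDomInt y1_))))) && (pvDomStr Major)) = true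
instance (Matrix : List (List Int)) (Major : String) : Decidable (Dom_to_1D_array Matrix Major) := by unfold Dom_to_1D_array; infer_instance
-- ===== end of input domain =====

-- B replaces A's up-to-four separate zero-counting region scans and its index-mutating preallocated
-- fill with ONE pass over all cells maintaining four zero-counters at once, then the same priority
-- classification and a direct comprehension build (objective: alternative).

-- ===== PORT A =====
-- Matrix[y][x]; exact where both indices are in range (Python raises IndexError outside; excluded by Pre_)
def pvCell (M : List (List Int)) (y x : Int) : Int :=
  PySem.List.pyGetD (PySem.List.pyGetD M y []) x 0

-- A's repeated double counting loop "for y in os: for x in ir(y): if Matrix[y][x]==0: acc += 1"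
def pvCountZ (M : List (List Int)) (os : List Int) (ir : Int → List Int) : Int :=
  os.foldl (fun acc y => (ir y).foldl
    (fun acc x => if pvCell M y x == 0 then acc + 1 else acc) acc) 0

-- A's repeated fill loop "for o in os: for i in ir(o): lst[index] = f o i; index += 1"
def pvFill (lst : List (Option Int)) (os : List Int) (ir : Int → List Int)
    (f : Int → Int → Int) : List (Option Int) :=
  (os.foldl (fun (st : List (Option Int) × Int) o =>
    (ir o).foldl (fun (st : List (Option Int) × Int) i =>
      (st.1.set st.2.toNat (some (f o i)), st.2 + 1)) st) (lst, (0 : Int))).1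

def to_1D_array (Matrix : List (List Int)) (Major : String) : List Int :=
  let size : Int := Matrix.length
  let lst : List (Option Int) := List.replicate (PySem.Int.floordiv ((1 + size) * size) 2).toNat none
  let theory : Int := PySem.Int.floordiv ((1 + (size - 1)) * (size - 1)) 2
  let a : Int := pvCountZ Matrix (PySem.List.pyRange 0 size) (fun y => PySem.List.pyRange 0 y)
  let right_up : Bool := a == theory
  let left_up : Bool :=
    if right_up = false then
      let b : Int := pvCountZ Matrix (PySem.List.pyRange 0 size) (fun y => PySem.List.pyRange (size - y) size)
      b == theory
    else false
  let left_down : Bool :=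
    if right_up = false && left_up = false then
      let c : Int := pvCountZ Matrix (PySem.List.pyRange 0 (size - 1)) (fun y => PySem.List.pyRange (y + 1) size)
      c == theory
    else false
  let right_down : Bool :=
    if right_up = false && left_up = false && left_down = false then
      let d : Int := pvCountZ Matrix (PySem.List.pyRange 0 (size - 1)) (fun y => PySem.List.pyRange 0 (size - (y + 1)))
      d == theory
    else false
  let lst :=
    if right_up then
      if Major == "r" then pvFill lst (PySem.List.pyRange 0 size) (fun y => PySem.List.pyRange y size) (fun y x => pvCell Matrix y x)
      else if Major == "c" then pvFill lst (PySem.List.pyRange 0 size) (fun x => PySem.List.pyRange 0 (x + 1)) (fun x y => pvCell Matrix y x)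
      else lst
    else lst
  let lst :=
    if left_up then
      if Major == "r" then pvFill lst (PySem.List.pyRange 0 size) (fun y => PySem.List.pyRange 0 (size - y)) (fun y x => pvCell Matrix y x)
      else if Major == "c" then pvFill lst (PySem.List.pyRange 0 size) (fun x => PySem.List.pyRange 0 (size - x)) (fun x y => pvCell Matrix y x)
      else lst
    else lst
  let lst :=
    if left_down then
      if Major == "r" then pvFill lst (PySem.List.pyRange 0 size) (fun y => PySem.List.pyRange 0 (y + 1)) (fun y x => pvCell Matrix y x)
      else if Major == "c" then pvFill lst (PySem.List.pyRange 0 size) (fun x => PySem.List.pyRange x size) (fun x y => pvCell Matrix y x)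
      else lst
    else lst
  let lst :=
    if right_down then
      if Major == "r" then pvFill lst (PySem.List.pyRange 0 size) (fun y => PySem.List.pyRange (size - 1 - y) size) (fun y x => pvCell Matrix y x)
      else if Major == "c" then pvFill lst (PySem.List.pyRange 0 size) (fun x => PySem.List.pyRange (size - 1 - x) size) (fun x y => pvCell Matrix y x)
      else lst
    else lst
  -- on Pre_ every slot has been written (all some); Python's leftover None entries are excluded by Pre_
  lst.map (fun o => o.getD 0)

-- ===== PORT B =====
-- B's per-cell update: "if v == 0: if x<y: a+=1; if x>=size-y: b+=1; if x>y: c+=1; if x<size-1-y: d+=1"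
-- (q = (x, v), the pair produced by enumerate)
def pvStep (size y : Int) (st : Int × Int × Int × Int) (q : Int × Int) : Int × Int × Int × Int :=
  if q.2 == 0 then
    ((if q.1 < y then st.1 + 1 else st.1),
     (if size - y ≤ q.1 then st.2.1 + 1 else st.2.1),
     (if y < q.1 then st.2.2.1 + 1 else st.2.2.1),
     (if q.1 < size - 1 - y then st.2.2.2 + 1 else st.2.2.2))
  else st

-- B's single pass "for y, row in enumerate(Matrix): for x, v in enumerate(row[:size]): …"
def pvScan (Matrix : List (List Int)) (size : Int) : Int × Int × Int × Int :=
  (PySem.List.enumerate Matrix 0).foldl (fun st p =>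
    (PySem.List.enumerate (PySem.List.slice p.2 none (some size)) 0).foldl (pvStep size p.1) st)
    (0, 0, 0, 0)

-- B's comprehension "[f(o, i) for o in os for i in ir(o)]"
def pvComp (os : List Int) (ir : Int → List Int) (f : Int → Int → Int) : List Int :=
  os.flatMap (fun o => (ir o).map (f o))

def to_1D_array_alt (Matrix : List (List Int)) (Major : String) : List Int :=
  let size : Int := Matrix.length
  let st := pvScan Matrix size
  let T : Int := PySem.Int.floordiv ((1 + (size - 1)) * (size - 1)) 2
  let sel : Option ((Int → List Int) × (Int → List Int)) :=
    if st.1 == T then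
      some (fun y => PySem.List.pyRange y size, fun x => PySem.List.pyRange 0 (x + 1))
    else if st.2.1 == T then
      some (fun y => PySem.List.pyRange 0 (size - y), fun x => PySem.List.pyRange 0 (size - x))
    else if st.2.2.1 == T then
      some (fun y => PySem.List.pyRange 0 (y + 1), fun x => PySem.List.pyRange x size)
    else if st.2.2.2 == T then
      some (fun y => PySem.List.pyRange (size - 1 - y) size, fun x => PySem.List.pyRange (size - 1 - x) size)
    else none
  match sel with
  | none => List.replicate (PySem.Int.floordiv ((1 + size) * size) 2).toNat 0  -- Python: [None]*n, excluded by Pre_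
  | some (rows, cols) =>
    if Major == "r" then pvComp (PySem.List.pyRange 0 size) rows (fun y x => pvCell Matrix y x)
    else if Major == "c" then pvComp (PySem.List.pyRange 0 size) cols (fun x y => pvCell Matrix y x)
    else List.replicate (PySem.Int.floordiv ((1 + size) * size) 2).toNat 0  -- Python: [None]*n, excluded by Pre_

-- ===== PRECONDITION & SPEC =====
def pvZeroAt (Matrix : List (List Int)) (y x : Nat) : Prop := (Matrix.getD y []).getD x 0 = 0

-- Pre_ excludes matrices with a row shorter than the matrix itself (A can raise IndexError there) and
-- inputs whose A-result would contain None — no complementary triangle all zero, or Major not 'r'/'c' —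
-- since None is not an Int.
def Pre_to_1D_array (Matrix : List (List Int)) (Major : String) : Prop :=
  (∀ row ∈ Matrix, Matrix.length ≤ row.length) ∧
  (Matrix = [] ∨ ((Major = "r" ∨ Major = "c") ∧
    ((∀ y < Matrix.length, ∀ x < Matrix.length, x < y → pvZeroAt Matrix y x) ∨
     (∀ y < Matrix.length, ∀ x < Matrix.length, Matrix.length ≤ x + y → pvZeroAt Matrix y x) ∨
     (∀ y < Matrix.length, ∀ x < Matrix.length, y < x → pvZeroAt Matrix y x) ∨
     (∀ y < Matrix.length, ∀ x < Matrix.length, x + y + 1 < Matrix.length → pvZeroAt Matrix y x))))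
instance (Matrix : List (List Int)) (Major : String) : Decidable (Pre_to_1D_array Matrix Major) := by
  unfold Pre_to_1D_array pvZeroAt; infer_instance

def pvWitness_to_1D_array : List (List Int) × String := ([[1, 2], [0, 3]], "r")

def Spec_to_1D_array (Matrix : List (List Int)) (Major : String) (out : List Int) : Prop := out = to_1D_array_alt Matrix Major
instance (Matrix : List (List Int)) (Major : String) (out : List Int) : Decidable (Spec_to_1D_array Matrix Major out) := by unfold Spec_to_1D_array; infer_instance

-- ===== CLAIM (what is proved, stated in full; the proofs are below) =====
def Claim_equal_to_1D_array : Prop := ∀ (Matrix : List (List Int)) (Major : String), Dom_to_1D_array Matrix Major → Pre_to_1D_array Matrix Major → Spec_to_1D_array Matrix Major (to_1D_array Matrix Major)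

-- ===== LEMMAS AND PROOFS =====

lemma pvPyLen (a b : Int) : (PySem.List.pyRange a b).length = (b - a).toNat := by
  rw [PySem.List.pyRange_of_pos a b one_pos]
  simp only [List.length_map, List.length_range]
  split <;> omega

lemma pvPyRangeNil (a b : Int) (h : b ≤ a) : PySem.List.pyRange a b = [] := by
  rw [PySem.List.pyRange_of_pos a b one_pos, if_neg (by omega)]
  simp

-- a projection commutes with foldl when the step commutes with it
lemma pvFoldlProj {σ α γ : Type} (π : σ → α) (f : σ → γ → σ) (g : α → γ → α)
    (h : ∀ st c, π (f st c) = g (π st) c) :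
    ∀ (l : List γ) (st : σ), π (l.foldl f st) = l.foldl g (π st) := by
  intro l
  induction l with
  | nil => intro st; rfl
  | cons c l ih => intro st; simp only [List.foldl_cons, ih, h]

lemma pvFoldId {γ : Type} (l : List γ) (acc : Int) : l.foldl (fun a _ => a) acc = acc := by
  induction l <;> simp_all

-- a filtered count over the full row range equals the plain count over the region [lo, hi)
lemma pvRowSplit (g : Int → Int) (P : Int → Bool) (n lo hi : Int)
    (h0 : 0 ≤ lo) (hlh : lo ≤ hi) (hn : hi ≤ n)
    (hP : ∀ x, 0 ≤ x → x < n → (P x = true ↔ lo ≤ x ∧ x < hi)) (acc : Int) :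
    (PySem.List.pyRange 0 n).foldl (fun a x => if g x == 0 then (if P x then a + 1 else a) else a) acc
    = (PySem.List.pyRange lo hi).foldl (fun a x => if g x == 0 then a + 1 else a) acc := by
  rw [PySem.List.pyRange_one_append 0 lo n h0 (le_trans hlh hn),
      PySem.List.pyRange_one_append lo hi n hlh hn, List.foldl_append, List.foldl_append]
  have hpre : (PySem.List.pyRange 0 lo).foldl
      (fun a x => if g x == 0 then (if P x then a + 1 else a) else a) acc = acc := by
    rw [PySem.List.foldl_congr_mem (g := fun a (_ : Int) => a), pvFoldId]
    intro a x hx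
    have hx' := (PySem.List.mem_pyRange_one).mp hx
    have hPx : P x = false := by
      by_cases hb : P x = true
      · exact absurd ((hP x hx'.1 (by omega)).mp hb) (by omega)
      · simpa using hb
    simp [hPx]
  rw [hpre]
  have hpost : ∀ acc2 : Int, (PySem.List.pyRange hi n).foldl
      (fun a x => if g x == 0 then (if P x then a + 1 else a) else a) acc2 = acc2 := by
    intro acc2
    rw [PySem.List.foldl_congr_mem (g := fun a (_ : Int) => a), pvFoldId]
    intro a x hx
    have hx' := (PySem.List.mem_pyRange_one).mp hx
    have hPx : P x = false := by
      by_cases hb : P x = true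
      · exact absurd ((hP x (by omega) hx'.2).mp hb) (by omega)
      · simpa using hb
    simp [hPx]
  rw [hpost]
  apply PySem.List.foldl_congr_mem
  intro a x hx
  have hx' := (PySem.List.mem_pyRange_one).mp hx
  have hPx : P x = true := (hP x (by omega) (by omega)).mpr ⟨hx'.1, hx'.2⟩
  simp [hPx]

-- dropping the last (empty-region) outer row does not change a region zero-count
lemma pvCountZBridge (M : List (List Int)) (n : Nat) (ir : Int → List Int)
    (hlast : ∀ m : Nat, n = m + 1 → ir (m : Int) = []) :
    pvCountZ M (PySem.List.pyRange 0 ((n : Int) - 1)) ir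
    = pvCountZ M (PySem.List.pyRange 0 (n : Int)) ir := by
  cases n with
  | zero =>
    rw [pvPyRangeNil 0 (((0 : Nat) : Int) - 1) (by norm_num), pvPyRangeNil 0 ((0 : Nat) : Int) (by norm_num)]
  | succ m =>
    have h1 : ((m + 1 : Nat) : Int) = (m : Int) + 1 := by push_cast; ring
    have h2 : ((m + 1 : Nat) : Int) - 1 = (m : Int) := by push_cast; ring
    rw [h2, h1, PySem.List.pyRange_one_succ_right (by positivity)]
    simp [pvCountZ, List.foldl_append, hlast m rfl]

-- the generic single-pass/region correspondence: any one component of B's pass equals A's zero-count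
-- of the matching region, provided every row is at least size long
lemma pvScanGen (M : List (List Int)) (hrow : ∀ row ∈ M, M.length ≤ row.length)
    (π : Int × Int × Int × Int → Int) (P : Int → Int → Bool)
    (hπ : ∀ (y : Int) (st : Int × Int × Int × Int) (q : Int × Int),
        π (pvStep (M.length : Int) y st q)
        = if q.2 == 0 then (if P y q.1 then π st + 1 else π st) else π st)
    (hπ0 : π (0, 0, 0, 0) = 0)
    (lo hi : Int → Int)
    (hb : ∀ y : Int, 0 ≤ y → y < (M.length : Int) →
        0 ≤ lo y ∧ lo y ≤ hi y ∧ hi y ≤ (M.length : Int))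
    (hP : ∀ y x : Int, 0 ≤ y → y < (M.length : Int) → 0 ≤ x → x < (M.length : Int) →
        (P y x = true ↔ lo y ≤ x ∧ x < hi y)) :
    π (pvScan M (M.length : Int))
    = pvCountZ M (PySem.List.pyRange 0 (M.length : Int)) (fun y => PySem.List.pyRange (lo y) (hi y)) := by
  unfold pvScan pvCountZ
  have hsplit := pvFoldlProj π
      (fun st p => (PySem.List.enumerate (PySem.List.slice p.2 none (some (M.length : Int))) 0).foldl
        (pvStep (M.length : Int) p.1) st)
      (fun a p => (PySem.List.enumerate (PySem.List.slice p.2 none (some (M.length : Int))) 0).foldl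
        (fun a q => if q.2 == 0 then (if P p.1 q.1 then a + 1 else a) else a) a)
      (fun st p => pvFoldlProj π _ _ (hπ p.1) _ st)
      (PySem.List.enumerate M 0) (0, 0, 0, 0)
  rw [hsplit, hπ0]
  rw [PySem.List.enumerate_eq_map_pyRange M ([] : List Int), List.foldl_map]
  simp only [PySem.List.len_eq]
  apply PySem.List.foldl_congr_mem
  intro acc y hy
  have hy' := (PySem.List.mem_pyRange_one).mp hy
  -- the row and its slice
  set row := PySem.List.pyGetD M y ([] : List Int) with hrowdef
  have hmem : row ∈ M := PySem.List.pyGetD_mem M ([] : List Int)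
    (by unfold PySem.Raise.InRange; omega)
  have hlen : M.length ≤ row.length := hrow row hmem
  have hslice : PySem.List.slice row none (some (M.length : Int)) = row.take M.length := by
    rw [PySem.List.slice_to row (by positivity)]
    simp
  have hslen : (row.take M.length).length = M.length := by simp; omega
  rw [hslice, PySem.List.enumerate_eq_map_pyRange (row.take M.length) (0 : Int), List.foldl_map]
  simp only [PySem.List.len_eq, hslen]
  have hcell : ∀ x : Int, 0 ≤ x → x < (M.length : Int) →
      PySem.List.pyGetD (row.take M.length) x 0 = pvCell M y x := by
    intro x hx0 hxn
    have hx1 : x < ((row.take M.length).length : Int) := by rw [hslen]; exact_mod_cast hxn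
    have hx2 : x < (row.length : Int) := by omega
    rw [PySem.List.pyGetD_eq_getElem _ _ hx0 hx1, pvCell, ← hrowdef,
        PySem.List.pyGetD_eq_getElem _ _ hx0 hx2]
    exact List.getElem_take
  have hcg := PySem.List.foldl_congr_mem (PySem.List.pyRange 0 (M.length : Int))
      (fun a x => if PySem.List.pyGetD (row.take M.length) x 0 == 0 then (if P y x then a + 1 else a) else a)
      (fun a x => if pvCell M y x == 0 then (if P y x then a + 1 else a) else a)
      acc
      (by intro a x hx
          have hx' := (PySem.List.mem_pyRange_one).mp hx
          dsimp only
          rw [hcell x hx'.1 hx'.2])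
  rw [hcg]
  exact pvRowSplit (pvCell M y) (P y) (M.length : Int) (lo y) (hi y)
    (hb y hy'.1 hy'.2).1 (hb y hy'.1 hy'.2).2.1 (hb y hy'.1 hy'.2).2.2
    (fun x hx0 hxn => hP y x hy'.1 hy'.2 hx0 hxn) acc

-- counter a = A's right-up region count
lemma pvScanA (M : List (List Int)) (hrow : ∀ row ∈ M, M.length ≤ row.length) :
    (pvScan M (M.length : Int)).1
    = pvCountZ M (PySem.List.pyRange 0 (M.length : Int)) (fun y => PySem.List.pyRange 0 y) := by
  exact pvScanGen M hrow (·.1) (fun y x => decide (x < y))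
    (by intro y st q; unfold pvStep; split <;> simp)
    rfl (fun _ => 0) (fun y => y)
    (by intro y h0 h1; dsimp only; omega)
    (by intro y x h0 h1 h2 h3; dsimp only; simp; omega)

-- counter b = A's left-up region count
lemma pvScanB (M : List (List Int)) (hrow : ∀ row ∈ M, M.length ≤ row.length) :
    (pvScan M (M.length : Int)).2.1
    = pvCountZ M (PySem.List.pyRange 0 (M.length : Int))
        (fun y => PySem.List.pyRange ((M.length : Int) - y) (M.length : Int)) := by
  exact pvScanGen M hrow (·.2.1) (fun y x => decide ((M.length : Int) - y ≤ x))
    (by intro y st q; unfold pvStep; split <;> simp)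
    rfl (fun y => (M.length : Int) - y) (fun _ => (M.length : Int))
    (by intro y h0 h1; dsimp only; omega)
    (by intro y x h0 h1 h2 h3; dsimp only; simp; omega)

-- counter c = A's left-down region count (A stops the outer loop one row early; the extra row is empty)
lemma pvScanC (M : List (List Int)) (hrow : ∀ row ∈ M, M.length ≤ row.length) :
    (pvScan M (M.length : Int)).2.2.1
    = pvCountZ M (PySem.List.pyRange 0 ((M.length : Int) - 1))
        (fun y => PySem.List.pyRange (y + 1) (M.length : Int)) := by
  rw [pvCountZBridge M M.length _ (fun m hm => pvPyRangeNil _ _ (by rw [hm]; push_cast; omega))]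
  exact pvScanGen M hrow (·.2.2.1) (fun y x => decide (y < x))
    (by intro y st q; unfold pvStep; split <;> simp)
    rfl (fun y => y + 1) (fun _ => (M.length : Int))
    (by intro y h0 h1; dsimp only; omega)
    (by intro y x h0 h1 h2 h3; dsimp only; simp; omega)

-- counter d = A's right-down region count (same one-row bridge; A's bound size-(y+1) is size-1-y)
lemma pvScanD (M : List (List Int)) (hrow : ∀ row ∈ M, M.length ≤ row.length) :
    (pvScan M (M.length : Int)).2.2.2
    = pvCountZ M (PySem.List.pyRange 0 ((M.length : Int) - 1))
        (fun y => PySem.List.pyRange 0 ((M.length : Int) - (y + 1))) := by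
  rw [pvCountZBridge M M.length _ (fun m hm => pvPyRangeNil _ _ (by rw [hm]; push_cast; omega))]
  exact pvScanGen M hrow (·.2.2.2) (fun y x => decide (x < (M.length : Int) - 1 - y))
    (by intro y st q; unfold pvStep; split <;> simp)
    rfl (fun _ => 0) (fun y => (M.length : Int) - (y + 1))
    (by intro y h0 h1; dsimp only; omega)
    (by intro y x h0 h1 h2 h3; dsimp only; simp; omega)

-- the fill loop starting at slot k writes vs into slots k, k+1, …
lemma pvFillFlat : ∀ (vs : List Int) (lst : List (Option Int)) (k : Nat), k + vs.length ≤ lst.length →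
    vs.foldl (fun (st : List (Option Int) × Int) v => (st.1.set st.2.toNat (some v), st.2 + 1)) (lst, (k : Int))
    = (lst.take k ++ vs.map some ++ lst.drop (k + vs.length), ((k + vs.length : Nat) : Int)) := by
  intro vs
  induction vs with
  | nil => intro lst k h; simp
  | cons v vs ih =>
    intro lst k h
    have hk : k < lst.length := by simp at h; omega
    simp only [List.foldl_cons, Int.toNat_natCast]
    have h1 : ((k : Int) + 1) = ((k + 1 : Nat) : Int) := by push_cast; ring
    rw [h1, ih (lst.set k (some v)) (k + 1) (by simp at h ⊢; omega)]
    rw [List.set_eq_take_cons_drop (some v) hk]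
    have ht : List.take (k + 1) (List.take k lst ++ some v :: List.drop (k + 1) lst)
        = List.take k lst ++ [some v] := by
      rw [List.take_append]
      simp [List.length_take, Nat.min_eq_left (le_of_lt hk), List.take_take]
    have hd : List.drop (k + 1 + vs.length) (List.take k lst ++ some v :: List.drop (k + 1) lst)
        = List.drop (k + 1 + vs.length) lst := by
      have hlt : (List.take k lst).length = k := by simp [Nat.min_eq_left (le_of_lt hk)]
      rw [List.drop_append, List.drop_eq_nil_of_le (by omega), hlt]
      have h2 : k + 1 + vs.length - k = vs.length + 1 := by omega
      rw [h2]
      simp only [List.nil_append, List.drop_succ_cons, List.drop_drop]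
    rw [ht, hd]
    simp only [List.map_cons, List.length_cons, Prod.mk.injEq]
    constructor
    · have h3 : k + 1 + vs.length = k + (vs.length + 1) := by omega
      rw [h3]
      simp
    · congr 1
      omega

lemma pvFill_eq_foldl (lst : List (Option Int)) (os : List Int) (ir : Int → List Int)
    (f : Int → Int → Int) :
    pvFill lst os ir f
    = ((pvComp os ir f).foldl (fun (st : List (Option Int) × Int) v =>
        (st.1.set st.2.toNat (some v), st.2 + 1)) (lst, (0 : Int))).1 := by
  unfold pvFill pvComp
  rw [List.foldl_flatMap]
  simp only [List.foldl_map]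

lemma pvFill_map_getD (os : List Int) (ir : Int → List Int)
    (f : Int → Int → Int) (N : Nat) (h : (pvComp os ir f).length = N) :
    (pvFill (List.replicate N none) os ir f).map (fun o => o.getD 0) = pvComp os ir f := by
  rw [pvFill_eq_foldl]
  have := pvFillFlat (pvComp os ir f) (List.replicate N none) 0 (by simp [h])
  simp only [Nat.cast_zero] at this
  rw [this]
  simp [h]

lemma pvCompLen (os : List Int) (ir : Int → List Int) (f : Int → Int → Int) :
    (pvComp os ir f).length = (os.flatMap ir).length := by
  simp [pvComp, List.length_flatMap]

lemma pvFlatLen (n : Nat) (ir : Int → List Int) (g : Nat → Nat)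
    (hg : ∀ k, k < n → (ir (k : Int)).length = g k) :
    ((PySem.List.pyRange 0 (n : Int)).flatMap ir).length = ((List.range n).map g).sum := by
  rw [PySem.List.pyRange_zero_natCast]
  simp only [List.length_flatMap, List.map_map]
  congr 1
  apply List.map_congr_left
  intro k hk
  exact hg k (List.mem_range.mp hk)

lemma pvSumSucc (n : Nat) : 2 * ((List.range n).map (fun k => k + 1)).sum = n * (n + 1) := by
  induction n with
  | zero => simp
  | succ m ih =>
    rw [List.range_succ]
    simp only [List.map_append, List.map_cons, List.map_nil, List.sum_append, List.sum_cons, List.sum_nil]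
    have h : (m + 1) * (m + 1 + 1) = m * (m + 1) + 2 * (m + 1) := by ring
    omega

lemma pvSumSub (n : Nat) : 2 * ((List.range n).map (fun k => n - k)).sum = n * (n + 1) := by
  have h : ((List.range n).map (fun k => n - k)).sum = ((List.range n).map (fun k => k + 1)).sum := by
    induction n with
    | zero => simp
    | succ m ih =>
      rw [List.range_succ]
      simp only [List.map_append, List.map_cons, List.map_nil, List.sum_append, List.sum_cons, List.sum_nil]
      have h1 : (List.range m).map (fun k => m + 1 - k) = (List.range m).map (fun k => (m - k) + 1) := by
        apply List.map_congr_left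
        intro k hk
        have := List.mem_range.mp hk
        omega
      have h2 : ((List.range m).map (fun k => (m - k) + 1)).sum
          = ((List.range m).map (fun k => m - k)).sum + ((List.range m).map (fun _ => 1)).sum := by
        rw [← List.sum_map_add]
      have h3 : ((List.range m).map (fun _ => (1 : Nat))).sum = m := by simp
      simp only [h1, h2, h3] at *
      omega
  rw [h]
  exact pvSumSucc n

lemma pvSumSubHalf (n : Nat) : ((List.range n).map (fun k => n - k)).sum = n * (n + 1) / 2 := by
  have := pvSumSub n; omega

lemma pvSumSuccHalf (n : Nat) : ((List.range n).map (fun k => k + 1)).sum = n * (n + 1) / 2 := by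
  have := pvSumSucc n; omega

lemma pvBigNDiv (n : Nat) : (((1 + (n : Int)) * (n : Int)) / 2).toNat = n * (n + 1) / 2 := by
  have h1 : (1 + (n : Int)) * (n : Int) = ((n * (n + 1) : Nat) : Int) := by push_cast; ring
  rw [h1]
  generalize n * (n + 1) = m
  omega

-- a fill branch, flattened: the written slots are exactly B's comprehension
lemma pvLeaf (M : List (List Int)) (ir : Int → List Int) (f : Int → Int → Int) (g : Nat → Nat)
    (hg : ∀ k, k < M.length → (ir (k : Int)).length = g k)
    (hsum : ((List.range M.length).map g).sum = M.length * (M.length + 1) / 2) :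
    (pvFill (List.replicate (((1 + (M.length : Int)) * (M.length : Int) / 2).toNat) none)
        (PySem.List.pyRange 0 (M.length : Int)) ir f).map (fun o => o.getD 0)
    = pvComp (PySem.List.pyRange 0 (M.length : Int)) ir f := by
  apply pvFill_map_getD
  rw [pvCompLen, pvFlatLen M.length ir g hg, hsum, pvBigNDiv]

-- ===== VERDICT (by name: the statement is the Claim_ definition above) =====
theorem to_1D_array_spec : Claim_equal_to_1D_array := by
  intro Matrix Major _ hpre
  unfold Spec_to_1D_array
  simp only [to_1D_array, to_1D_array_alt]
  rw [pvScanA Matrix hpre.1, pvScanB Matrix hpre.1, pvScanC Matrix hpre.1, pvScanD Matrix hpre.1]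
  generalize (pvCountZ Matrix (PySem.List.pyRange 0 (Matrix.length : Int)) (fun y => PySem.List.pyRange 0 y)
      == PySem.Int.floordiv ((1 + ((Matrix.length : Int) - 1)) * ((Matrix.length : Int) - 1)) 2) = bA
  generalize (pvCountZ Matrix (PySem.List.pyRange 0 (Matrix.length : Int)) (fun y => PySem.List.pyRange ((Matrix.length : Int) - y) (Matrix.length : Int))
      == PySem.Int.floordiv ((1 + ((Matrix.length : Int) - 1)) * ((Matrix.length : Int) - 1)) 2) = bB
  generalize (pvCountZ Matrix (PySem.List.pyRange 0 ((Matrix.length : Int) - 1)) (fun y => PySem.List.pyRange (y + 1) (Matrix.length : Int))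
      == PySem.Int.floordiv ((1 + ((Matrix.length : Int) - 1)) * ((Matrix.length : Int) - 1)) 2) = bC
  generalize (pvCountZ Matrix (PySem.List.pyRange 0 ((Matrix.length : Int) - 1)) (fun y => PySem.List.pyRange 0 ((Matrix.length : Int) - (y + 1)))
      == PySem.Int.floordiv ((1 + ((Matrix.length : Int) - 1)) * ((Matrix.length : Int) - 1)) 2) = bD
  cases bA with
  | true =>
    simp
    by_cases hr : Major = "r"
    · simp only [hr, if_true]
      exact pvLeaf Matrix _ _ (fun k => Matrix.length - k)
        (fun k hk => by rw [pvPyLen]; show _ = Matrix.length - k; omega) (pvSumSubHalf _)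
    · by_cases hc : Major = "c"
      · simp only [hc, if_true]
        exact pvLeaf Matrix _ _ (fun k => k + 1)
          (fun k hk => by rw [pvPyLen]; show _ = k + 1; omega) (pvSumSuccHalf _)
      · simp [if_neg hr, if_neg hc]
  | false =>
    cases bB with
    | true =>
      simp
      by_cases hr : Major = "r"
      · simp only [hr, if_true]
        exact pvLeaf Matrix _ _ (fun k => Matrix.length - k)
          (fun k hk => by rw [pvPyLen]; show _ = Matrix.length - k; omega) (pvSumSubHalf _)
      · by_cases hc : Major = "c"
        · simp only [hc, if_true]
          exact pvLeaf Matrix _ _ (fun k => Matrix.length - k)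
            (fun k hk => by rw [pvPyLen]; show _ = Matrix.length - k; omega) (pvSumSubHalf _)
        · simp [if_neg hr, if_neg hc]
    | false =>
      cases bC with
      | true =>
        simp
        by_cases hr : Major = "r"
        · simp only [hr, if_true]
          exact pvLeaf Matrix _ _ (fun k => k + 1)
            (fun k hk => by rw [pvPyLen]; show _ = k + 1; omega) (pvSumSuccHalf _)
        · by_cases hc : Major = "c"
          · simp only [hc, if_true]
            exact pvLeaf Matrix _ _ (fun k => Matrix.length - k)
              (fun k hk => by rw [pvPyLen]; show _ = Matrix.length - k; omega) (pvSumSubHalf _)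
          · simp [if_neg hr, if_neg hc]
      | false =>
        cases bD with
        | true =>
          simp
          by_cases hr : Major = "r"
          · simp only [hr, if_true]
            exact pvLeaf Matrix _ _ (fun k => k + 1)
              (fun k hk => by rw [pvPyLen]; show _ = k + 1; omega) (pvSumSuccHalf _)
          · by_cases hc : Major = "c"
            · simp only [hc, if_true]
              exact pvLeaf Matrix _ _ (fun k => k + 1)
                (fun k hk => by rw [pvPyLen]; show _ = k + 1; omega) (pvSumSuccHalf _)
            · simp [if_neg hr, if_neg hc]
        | false => simp
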